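-- pv_equiv track=rewrite | github.com/dprodger/JazzReference | backend/scripts/diagnose_recording_crosscontamination.py | performers_match_single_artist
-- ===== SOURCE A (Python) =====
-- from typing import Dict, List, Set, Optional, Any
--
-- def performers_match_single_artist(performer_names: List[str], primary_artists: Set[str]) -> bool:
--     """
--     Check if all performers can be attributed to a single primary artist.
--
--     This handles cases where a recording appears on:
--     - The original artist's album (credited to "Frank Sinatra")
--     - A compilation (credited to "The Rat Pack")
--
--     If all performers match just one artist, the other credits are probably
--     just reissues/compilations, not contamination.
--
--     Returns True if performers likely belong to single artist (not contaminated).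
--     """
--     if not performer_names or not primary_artists:
--         return False
--
--     if len(primary_artists) <= 1:
--         return True  # Already single artist
--
--     # Normalize performer names for comparison
--     normalized_performers = [name.lower().strip() for name in performer_names]
--
--     # For each primary artist, count how many performers match
--     for artist in primary_artists:
--         matches = 0
--         for performer in normalized_performers:
--             # Check various matching conditions
--             if (artist in performer or
--                 performer in artist or
--                 # Check if performer's last name matches artist
--                 any(word in artist for word in performer.split() if len(word) > 3) or
--                 any(word in performer for word in artist.split() if len(word) > 3)):
--                 matches += 1
--
--         # If this single artist accounts for a significant portion of performers,
--         # the recording is probably legitimately theirs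
--         if matches > 0 and matches >= len(normalized_performers) * 0.5:
--             # Check if any OTHER artist also has significant matches
--             other_matches = 0
--             for other_artist in primary_artists:
--                 if other_artist == artist:
--                     continue
--                 for performer in normalized_performers:
--                     if (other_artist in performer or
--                         performer in other_artist or
--                         any(word in other_artist for word in performer.split() if len(word) > 3) or
--                         any(word in performer for word in other_artist.split() if len(word) > 3)):
--                         other_matches += 1
--                         break  # Found a match for this other artist
--
--             # If no other artist has matching performers, it's not contamination
--             if other_matches == 0:
--                 return True
--
--     return False
-- ===== SOURCE B (Python) =====
-- from typing import List, Set
--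
-- def _words_over3(s: str) -> List[str]:
--     return [w for w in s.split() if len(w) > 3]
--
-- def _matches(artist: str, performer: str) -> bool:
--     return (artist in performer or performer in artist
--             or any(w in artist for w in _words_over3(performer))
--             or any(w in performer for w in _words_over3(artist)))
--
-- def performers_match_single_artist(performer_names: List[str], primary_artists: Set[str]) -> bool:
--     if not performer_names or not primary_artists:
--         return False
--     if len(primary_artists) <= 1:
--         return True
--     # One pass over the performers, tallying per-artist match counts in a dict;
--     # no per-candidate rescan of the other artists.
--     counts = {}
--     for name in performer_names:
--         p = name.lower().strip()
--         for a in primary_artists: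
--             if _matches(a, p):
--                 counts[a] = counts.get(a, 0) + 1
--     if len(counts) != 1:
--         return False
--     (c,) = counts.values()
--     return 2 * c >= len(performer_names)
-- ===== Notes on version B (the rewrite author's own statement) =====
-- stated objective: alternative
-- what changed: Replaces A's artist-outer scans with a per-candidate rescan of all other artists by one performer-outer pass that tallies per-artist match counts into a dict, then checks the dict has exactly one key and compares its count to half the performer count.
import Mathlib
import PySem

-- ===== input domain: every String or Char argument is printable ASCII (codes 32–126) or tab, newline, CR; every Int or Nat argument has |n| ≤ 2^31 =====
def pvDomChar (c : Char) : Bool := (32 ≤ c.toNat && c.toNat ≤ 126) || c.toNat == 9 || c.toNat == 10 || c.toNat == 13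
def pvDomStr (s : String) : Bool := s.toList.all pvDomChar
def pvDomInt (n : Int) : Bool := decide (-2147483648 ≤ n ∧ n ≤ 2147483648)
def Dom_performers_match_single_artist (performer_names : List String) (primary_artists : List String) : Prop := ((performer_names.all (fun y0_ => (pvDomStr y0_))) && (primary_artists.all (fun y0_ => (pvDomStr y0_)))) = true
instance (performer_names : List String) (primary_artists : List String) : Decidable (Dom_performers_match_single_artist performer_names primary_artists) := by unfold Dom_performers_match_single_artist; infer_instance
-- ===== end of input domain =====

-- B replaces A's artist-outer scans (with a per-candidate rescan of all other artists) by a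
-- single performer-outer pass building a per-artist match-count dict, checked for one sole key.


-- ===== PORT A =====
-- A's inline matching condition (written twice inline in A's Python; identical both times)
def pvMatchA (artist performer : String) : Bool :=
  PySem.Str.isIn artist performer ||
  PySem.Str.isIn performer artist ||
  (PySem.Str.split₀ performer).any (fun w => decide (PySem.Str.len w > 3) && PySem.Str.isIn w artist) ||
  (PySem.Str.split₀ artist).any (fun w => decide (PySem.Str.len w > 3) && PySem.Str.isIn w performer)

-- 'matches >= len * 0.5' is ported as '2 * matches ≥ len' (exact: n * 0.5 is exact in binary floating point)
def performers_match_single_artist (performer_names : List String) (primary_artists : List String) : Bool :=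
  if performer_names.isEmpty || primary_artists.isEmpty then false
  else if primary_artists.length ≤ 1 then true
  else
    let normalized_performers := performer_names.map (fun name => PySem.Str.strip (PySem.Str.lower name))
    primary_artists.any (fun artist =>
      let mcount : Int := normalized_performers.foldl (fun m performer => if pvMatchA artist performer then m + 1 else m) 0
      if mcount > 0 ∧ 2 * mcount ≥ (normalized_performers.length : Int) then
        let other_matches : Int := primary_artists.foldl (fun om other_artist =>
          if other_artist == artist then om
          else if normalized_performers.any (fun performer => pvMatchA other_artist performer) then om + 1
          else om) 0
        other_matches == 0
      else false)

-- ===== PORT B =====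
-- B's helpers: the words of a string longer than 3 chars, and the match predicate built from them
def pvWords3 (s : String) : List String :=
  (PySem.Str.split₀ s).filter (fun w => decide (PySem.Str.len w > 3))

def pvMatchB (artist performer : String) : Bool :=
  PySem.Str.isIn artist performer ||
  PySem.Str.isIn performer artist ||
  (pvWords3 performer).any (fun w => PySem.Str.isIn w artist) ||
  (pvWords3 artist).any (fun w => PySem.Str.isIn w performer)

def performers_match_single_artist_alt (performer_names : List String) (primary_artists : List String) : Bool :=
  if performer_names.isEmpty || primary_artists.isEmpty then false
  else if primary_artists.length ≤ 1 then true
  else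
    let counts : PySem.Dict String Int :=
      performer_names.foldl (fun d name =>
        let p := PySem.Str.strip (PySem.Str.lower name)
        primary_artists.foldl (fun d a =>
          if pvMatchB a p then d.insert a (d.getD a 0 + 1) else d) d)
        PySem.Dict.empty
    match counts.items with
    | [(_, c)] => decide (2 * c ≥ (performer_names.length : Int))
    | _ => false

-- ===== PRECONDITION & SPEC =====
-- primary_artists encodes a Python set, so Pre_ states the encoding invariant: its elements are
-- distinct (a list with duplicates represents no Python input; A's Python parameter is Set[str]).
def Pre_performers_match_single_artist (performer_names : List String) (primary_artists : List String) : Prop :=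
  primary_artists.Nodup
instance (performer_names : List String) (primary_artists : List String) : Decidable (Pre_performers_match_single_artist performer_names primary_artists) := by unfold Pre_performers_match_single_artist; infer_instance

def pvWitness_performers_match_single_artist : List String × List String :=
  (["Frank Sinatra", "sinatra"], ["sinatra", "The Rat Pack"])

def Spec_performers_match_single_artist (performer_names : List String) (primary_artists : List String) (out : Bool) : Prop := out = performers_match_single_artist_alt performer_names primary_artists
instance (performer_names : List String) (primary_artists : List String) (out : Bool) : Decidable (Spec_performers_match_single_artist performer_names primary_artists out) := by unfold Spec_performers_match_single_artist; infer_instance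

-- ===== CLAIM (what is proved, stated in full; the proofs are below) =====
def Claim_equal_performers_match_single_artist : Prop := ∀ (performer_names : List String) (primary_artists : List String), Dom_performers_match_single_artist performer_names primary_artists → Pre_performers_match_single_artist performer_names primary_artists → Spec_performers_match_single_artist performer_names primary_artists (performers_match_single_artist performer_names primary_artists)

-- ===== LEMMAS AND PROOFS =====

theorem pvMatch_eq (a p : String) : pvMatchA a p = pvMatchB a p := by
  simp [pvMatchA, pvMatchB, pvWords3, List.any_filter]

-- the inner (per-performer) loop of B: lookup and key membership
theorem pvInner_getD (pa : List String) (p : String) (d : PySem.Dict String Int) (x : String) :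
    ((pa.foldl (fun d a => if pvMatchB a p then d.insert a (d.getD a 0 + 1) else d) d).getD x 0)
    = d.getD x 0 + (pa.countP (fun a => a == x && pvMatchB a p) : Int) := by
  induction pa generalizing d with
  | nil => simp
  | cons a t ih =>
    simp only [List.foldl_cons, List.countP_cons]
    by_cases hm : pvMatchB a p
    · rw [if_pos hm, ih]
      by_cases hax : a = x
      · subst hax; simp [hm]; ring
      · simp [PySem.Dict.getD_insert, Ne.symm hax, hax, hm]
    · rw [if_neg hm, ih]; simp [hm]

theorem pvInner_keys (pa : List String) (p : String) (d : PySem.Dict String Int) (x : String) :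
    (x ∈ (pa.foldl (fun d a => if pvMatchB a p then d.insert a (d.getD a 0 + 1) else d) d).keys)
    ↔ x ∈ d.keys ∨ (x ∈ pa ∧ pvMatchB x p) := by
  induction pa generalizing d with
  | nil => simp
  | cons a t ih =>
    simp only [List.foldl_cons]
    by_cases hm : pvMatchB a p
    · rw [if_pos hm, ih]
      simp only [PySem.Dict.mem_keys_insert, List.mem_cons]
      constructor
      · rintro ((h | h) | h)
        · subst h; exact Or.inr ⟨Or.inl rfl, hm⟩
        · exact Or.inl h
        · exact Or.inr ⟨Or.inr h.1, h.2⟩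
      · rintro (h | ⟨(h | h), hmx⟩)
        · exact Or.inl (Or.inr h)
        · subst h; exact Or.inl (Or.inl rfl)
        · exact Or.inr ⟨h, hmx⟩
    · rw [if_neg hm, ih]
      constructor
      · rintro (h | h)
        · exact Or.inl h
        · exact Or.inr ⟨List.mem_cons_of_mem _ h.1, h.2⟩
      · rintro (h | ⟨h, hmx⟩)
        · exact Or.inl h
        · rcases List.mem_cons.mp h with h | h
          · subst h; exact absurd hmx hm
          · exact Or.inr ⟨h, hmx⟩

theorem pvInner_nodup (pa : List String) (p : String) (d : PySem.Dict String Int)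
    (h : d.keys.Nodup) :
    (pa.foldl (fun d a => if pvMatchB a p then d.insert a (d.getD a 0 + 1) else d) d).keys.Nodup := by
  induction pa generalizing d with
  | nil => exact h
  | cons a t ih =>
    simp only [List.foldl_cons]
    by_cases hm : pvMatchB a p
    · rw [if_pos hm]; exact ih _ (PySem.Dict.nodup_keys_insert _ _ _ h)
    · rw [if_neg hm]; exact ih _ h

-- the whole counting loop: its dict's lookup and key set
theorem pvOuter_getD (pn pa : List String) (x : String) :
    ((pn.foldl (fun d name =>
        pa.foldl (fun d a => if pvMatchB a (PySem.Str.strip (PySem.Str.lower name)) then d.insert a (d.getD a 0 + 1) else d) d)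
      PySem.Dict.empty).getD x 0)
    = ((pn.map (fun n => PySem.Str.strip (PySem.Str.lower n))).countP (fun p => pvMatchB x p) : Int)
        * (pa.countP (fun a => a == x) : Int) := by
  suffices h : ∀ d : PySem.Dict String Int,
      ((pn.foldl (fun d name =>
        pa.foldl (fun d a => if pvMatchB a (PySem.Str.strip (PySem.Str.lower name)) then d.insert a (d.getD a 0 + 1) else d) d) d).getD x 0)
      = d.getD x 0 + ((pn.map (fun n => PySem.Str.strip (PySem.Str.lower n))).countP (fun p => pvMatchB x p) : Int)
          * (pa.countP (fun a => a == x) : Int) by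
    simpa using h PySem.Dict.empty
  induction pn with
  | nil => simp
  | cons n t ih =>
    intro d
    simp only [List.foldl_cons, List.map_cons, List.countP_cons]
    rw [ih, pvInner_getD]
    have hc : ∀ p, pa.countP (fun a => a == x && pvMatchB a p)
        = if pvMatchB x p then pa.countP (fun a => a == x) else 0 := by
      intro p
      by_cases hm : pvMatchB x p
      · rw [if_pos hm]
        apply List.countP_congr
        intro a _
        constructor
        · intro h; exact (Bool.and_eq_true ..).mp h |>.1
        · intro h
          have : a = x := by simpa using h
          subst this; simp [hm]
      · rw [if_neg hm]
        apply List.countP_eq_zero.mpr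
        intro a ha h
        have h2 := (Bool.and_eq_true ..).mp h
        have : a = x := by simpa using h2.1
        subst this; exact hm h2.2
    rw [hc]
    by_cases hm : pvMatchB x (PySem.Str.strip (PySem.Str.lower n)) <;> simp [hm] <;> ring

theorem pvOuter_keys (pn pa : List String) (x : String) :
    (x ∈ (pn.foldl (fun d name =>
        pa.foldl (fun d a => if pvMatchB a (PySem.Str.strip (PySem.Str.lower name)) then d.insert a (d.getD a 0 + 1) else d) d)
      (PySem.Dict.empty : PySem.Dict String Int)).keys)
    ↔ x ∈ pa ∧ (pn.map (fun n => PySem.Str.strip (PySem.Str.lower n))).any (fun p => pvMatchB x p) := by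
  suffices h : ∀ d : PySem.Dict String Int,
      (x ∈ (pn.foldl (fun d name =>
        pa.foldl (fun d a => if pvMatchB a (PySem.Str.strip (PySem.Str.lower name)) then d.insert a (d.getD a 0 + 1) else d) d) d).keys)
      ↔ x ∈ d.keys ∨ (x ∈ pa ∧ ∃ n ∈ pn, pvMatchB x (PySem.Str.strip (PySem.Str.lower n)) = true) by
    rw [h PySem.Dict.empty]
    simp [List.any_eq_true]
  induction pn with
  | nil => simp
  | cons n t ih =>
    intro d
    simp only [List.foldl_cons]
    rw [ih, pvInner_keys]
    constructor
    · rintro ((h | h) | h)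
      · exact Or.inl h
      · exact Or.inr ⟨h.1, n, List.mem_cons_self .., h.2⟩
      · exact Or.inr ⟨h.1, h.2.choose, List.mem_cons_of_mem _ h.2.choose_spec.1, h.2.choose_spec.2⟩
    · rintro (h | ⟨hx, m, hm, hmx⟩)
      · exact Or.inl (Or.inl h)
      · rcases List.mem_cons.mp hm with h | h
        · subst h; exact Or.inl (Or.inr ⟨hx, hmx⟩)
        · exact Or.inr ⟨hx, m, h, hmx⟩

theorem pvOuter_nodup (pn pa : List String) :
    (pn.foldl (fun d name =>
        pa.foldl (fun d a => if pvMatchB a (PySem.Str.strip (PySem.Str.lower name)) then d.insert a (d.getD a 0 + 1) else d) d)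
      (PySem.Dict.empty : PySem.Dict String Int)).keys.Nodup := by
  suffices h : ∀ d : PySem.Dict String Int, d.keys.Nodup →
      (pn.foldl (fun d name =>
        pa.foldl (fun d a => if pvMatchB a (PySem.Str.strip (PySem.Str.lower name)) then d.insert a (d.getD a 0 + 1) else d) d) d).keys.Nodup by
    exact h PySem.Dict.empty (by simp)
  induction pn with
  | nil => exact fun d h => h
  | cons n t ih =>
    intro d h
    simp only [List.foldl_cons]
    exact ih _ (pvInner_nodup _ _ _ h)

-- A's candidate scan equals the 'exactly one matching artist + majority count' criterion,
-- phrased on the matching-artist filter, for a duplicate-free artist list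
theorem pv_main (P pa : List String) (hnd : pa.Nodup) :
    (pa.any (fun artist =>
      let mcount : Int := P.foldl (fun m performer => if pvMatchA artist performer then m + 1 else m) 0
      if mcount > 0 ∧ 2 * mcount ≥ (P.length : Int) then
        let other_matches : Int := pa.foldl (fun om other_artist =>
          if other_artist == artist then om
          else if P.any (fun performer => pvMatchA other_artist performer) then om + 1
          else om) 0
        other_matches == 0
      else false))
    = (match pa.filter (fun a => P.any (fun p => pvMatchA a p)) with
       | [sole] => decide (2 * P.countP (fun p => pvMatchA sole p) ≥ P.length)
       | _ => false) := by
  have hcnt : ∀ a : String, P.foldl (fun (m : Int) p => if pvMatchA a p then m + 1 else m) 0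
      = (P.countP (fun p => pvMatchA a p) : Int) := by
    intro a; simpa using PySem.List.foldl_count_if (fun p => pvMatchA a p) P 0
  have hoth : ∀ a : String, pa.foldl (fun (om : Int) o =>
        if o == a then om else if P.any (fun q => pvMatchA o q) then om + 1 else om) 0
      = (pa.countP (fun o => !(o == a) && P.any (fun q => pvMatchA o q)) : Int) := by
    intro a
    have hfe : (fun (om : Int) o => if o == a then om else if P.any (fun q => pvMatchA o q) then om + 1 else om)
        = (fun (om : Int) o => if (!(o == a) && P.any (fun q => pvMatchA o q)) then om + 1 else om) := by
      funext om o
      by_cases h : o == a <;> by_cases h2 : P.any (fun q => pvMatchA o q) <;> simp [h, h2]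
    rw [hfe]; simpa using PySem.List.foldl_count_if (fun o => !(o == a) && P.any (fun q => pvMatchA o q)) pa 0
  have hbody : ∀ a : String,
      (let mcount : Int := P.foldl (fun m performer => if pvMatchA a performer then m + 1 else m) 0
       if mcount > 0 ∧ 2 * mcount ≥ (P.length : Int) then
         (let other_matches : Int := pa.foldl (fun om o =>
            if o == a then om else if P.any (fun performer => pvMatchA o performer) then om + 1 else om) 0
          other_matches == 0)
       else false)
      = (if 0 < P.countP (fun p => pvMatchA a p) ∧ 2 * P.countP (fun p => pvMatchA a p) ≥ P.length
         then decide (pa.countP (fun o => !(o == a) && P.any (fun q => pvMatchA o q)) = 0) else false) := by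
    intro a
    simp only [hcnt, hoth]
    have hiff : ((P.countP (fun p => pvMatchA a p) : Int) > 0 ∧
        2 * (P.countP (fun p => pvMatchA a p) : Int) ≥ (P.length : Int)) ↔
        (0 < P.countP (fun p => pvMatchA a p) ∧ 2 * P.countP (fun p => pvMatchA a p) ≥ P.length) := by
      constructor <;> rintro ⟨h1, h2⟩ <;> constructor <;> [exact_mod_cast h1; exact_mod_cast h2;
        exact_mod_cast h1; exact_mod_cast h2]
    by_cases hc : 0 < P.countP (fun p => pvMatchA a p) ∧ 2 * P.countP (fun p => pvMatchA a p) ≥ P.length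
    · rw [if_pos (hiff.mpr hc), if_pos hc]
      by_cases hz : pa.countP (fun o => !(o == a) && P.any (fun q => pvMatchA o q)) = 0 <;> simp [hz]
    · rw [if_neg (fun h => hc (hiff.mp h)), if_neg hc]
  simp only [hbody]
  rcases hf : pa.filter (fun b => P.any (fun q => pvMatchA b q)) with _ | ⟨s, _ | ⟨t, rest⟩⟩
  · -- no artist matches any performer
    apply List.any_eq_false.mpr
    intro a ha
    have hz : P.countP (fun p => pvMatchA a p) = 0 := by
      apply List.countP_eq_zero.mpr
      intro p hp hm
      have hGa : (P.any (fun q => pvMatchA a q)) = true := List.any_eq_true.mpr ⟨p, hp, hm⟩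
      have : a ∈ pa.filter (fun b => P.any (fun q => pvMatchA b q)) := List.mem_filter.mpr ⟨ha, hGa⟩
      simp [hf] at this
    simp [hz]
  · -- exactly one matching artist s
    have hsmem : s ∈ pa ∧ (P.any (fun q => pvMatchA s q)) = true := by
      have : s ∈ pa.filter (fun b => P.any (fun q => pvMatchA b q)) := by rw [hf]; exact List.mem_singleton_self s
      exact List.mem_filter.mp this
    have huniq : ∀ b ∈ pa, (P.any (fun q => pvMatchA b q)) = true → b = s := by
      intro b hb hGb
      have : b ∈ pa.filter (fun b => P.any (fun q => pvMatchA b q)) := List.mem_filter.mpr ⟨hb, hGb⟩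
      rw [hf] at this; simpa using this
    by_cases hth : 2 * P.countP (fun p => pvMatchA s p) ≥ P.length
    · simp only [hth, decide_true]
      apply List.any_eq_true.mpr
      refine ⟨s, hsmem.1, ?_⟩
      have hpos : 0 < P.countP (fun p => pvMatchA s p) := by
        rcases List.any_eq_true.mp hsmem.2 with ⟨p, hp, hm⟩
        rcases Nat.eq_zero_or_pos (P.countP (fun p => pvMatchA s p)) with h0 | h
        · exact absurd hm (List.countP_eq_zero.mp h0 p hp)
        · exact h
      rw [if_pos ⟨hpos, hth⟩]
      have hz : pa.countP (fun o => !(o == s) && P.any (fun q => pvMatchA o q)) = 0 := by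
        apply List.countP_eq_zero.mpr
        intro o ho
        by_cases he : o = s
        · simp [he]
        · simp only [Bool.and_eq_true, Bool.not_eq_true', beq_eq_false_iff_ne, ne_eq]
          rintro ⟨-, hGo⟩
          exact he (huniq o ho hGo)
      simp [hz]
    · simp only [hth, decide_false]
      apply List.any_eq_false.mpr
      intro a ha
      by_cases hGa : (P.any (fun q => pvMatchA a q)) = true
      · have has : a = s := huniq a ha hGa
        subst has
        rw [if_neg (fun h => hth h.2)]
        simp
      · have hz : P.countP (fun p => pvMatchA a p) = 0 := by
          apply List.countP_eq_zero.mpr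
          intro p hp hm
          exact hGa (List.any_eq_true.mpr ⟨p, hp, hm⟩)
        simp [hz]
  · -- at least two matching artists: nobody passes the other-artist check
    apply List.any_eq_false.mpr
    intro a ha
    have hsub : ∀ x ∈ s :: t :: rest, x ∈ pa ∧ (P.any (fun q => pvMatchA x q)) = true := by
      intro x hx
      have hx' : x ∈ pa.filter (fun b => P.any (fun q => pvMatchA b q)) := by rw [hf]; exact hx
      exact List.mem_filter.mp hx'
    have hst : s ≠ t := by
      have : (s :: t :: rest).Nodup := hf ▸ hnd.filter (fun b => P.any (fun q => pvMatchA b q))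
      intro h; subst h; simp at this
    have hex : ∃ o, o ∈ pa ∧ (!(o == a) && P.any (fun q => pvMatchA o q)) = true := by
      by_cases hsa : s = a
      · refine ⟨t, (hsub t (by simp)).1, ?_⟩
        have hta : t ≠ a := by rw [← hsa]; exact fun h => hst h.symm
        simp [hta, (hsub t (by simp)).2]
      · exact ⟨s, (hsub s (by simp)).1, by simp [hsa, (hsub s (by simp)).2]⟩
    rcases hex with ⟨o, ho, hoo⟩
    have hpos : 0 < pa.countP (fun o => !(o == a) && P.any (fun q => pvMatchA o q)) := by
      rcases Nat.eq_zero_or_pos (pa.countP (fun o => !(o == a) && P.any (fun q => pvMatchA o q))) with h0 | h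
      · exact absurd hoo (List.countP_eq_zero.mp h0 o ho)
      · exact h
    by_cases hcc : 0 < P.countP (fun p => pvMatchA a p) ∧ 2 * P.countP (fun p => pvMatchA a p) ≥ P.length
    · rw [if_pos hcc]
      simp only [decide_eq_true_eq]
      omega
    · rw [if_neg hcc]
      simp

-- the filter criterion equals B's dict inspection (pa Nodup)
theorem pv_bridge (pn pa : List String) (hnd : pa.Nodup) :
    (match pa.filter (fun a => (pn.map (fun n => PySem.Str.strip (PySem.Str.lower n))).any (fun p => pvMatchB a p)) with
       | [sole] => decide (2 * (pn.map (fun n => PySem.Str.strip (PySem.Str.lower n))).countP (fun p => pvMatchB sole p)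
                     ≥ (pn.map (fun n => PySem.Str.strip (PySem.Str.lower n))).length)
       | _ => false)
    = (match (pn.foldl (fun d name =>
        pa.foldl (fun d a => if pvMatchB a (PySem.Str.strip (PySem.Str.lower name)) then d.insert a (d.getD a 0 + 1) else d) d)
      (PySem.Dict.empty : PySem.Dict String Int)).items with
       | [(_, c)] => decide (2 * c ≥ (pn.length : Int))
       | _ => false) := by
  set P := pn.map (fun n => PySem.Str.strip (PySem.Str.lower n)) with hP
  set D := pn.foldl (fun d name =>
        pa.foldl (fun d a => if pvMatchB a (PySem.Str.strip (PySem.Str.lower name)) then d.insert a (d.getD a 0 + 1) else d) d)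
      (PySem.Dict.empty : PySem.Dict String Int) with hD
  have hk : ∀ x, x ∈ D.keys ↔ x ∈ pa.filter (fun a => P.any (fun p => pvMatchB a p)) := by
    intro x
    rw [hD, pvOuter_keys]
    simp [List.mem_filter, hP]
  have hknd : D.keys.Nodup := pvOuter_nodup pn pa
  have hfn : (pa.filter (fun a => P.any (fun p => pvMatchB a p))).Nodup :=
    hnd.filter _
  have hperm : D.keys.Perm (pa.filter (fun a => P.any (fun p => pvMatchB a p))) :=
    List.perm_of_nodup_nodup_toFinset_eq hknd hfn (by ext x; simp [hk x])
  have hitems := PySem.Dict.items_eq_map_keys D hknd (0 : Int)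
  rcases hf : pa.filter (fun a => P.any (fun p => pvMatchB a p)) with _ | ⟨s, _ | ⟨t, rest⟩⟩
  · have hkeys : D.keys = [] := (hf ▸ hperm).eq_nil
    rw [hitems, hkeys]
    rfl
  · have hkeys : D.keys = [s] := List.perm_singleton.mp (hf ▸ hperm)
    rw [hitems, hkeys]
    have hs : s ∈ pa := (List.mem_filter.mp (hf ▸ List.mem_singleton_self s)).1
    have hcs : pa.countP (fun a => a == s) = 1 := by
      rw [← List.count_eq_countP]
      exact List.count_eq_one_of_mem hnd hs
    have hval : D.getD s 0 = (P.countP (fun p => pvMatchB s p) : Int) := by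
      rw [hD, pvOuter_getD, ← hP, hcs]; ring
    have hlen : P.length = pn.length := by rw [hP]; exact List.length_map ..
    simp only [List.map_cons, List.map_nil, hval]
    show decide (2 * P.countP (fun p => pvMatchB s p) ≥ P.length)
       = decide (2 * (P.countP (fun p => pvMatchB s p) : Int) ≥ (pn.length : Int))
    rw [decide_eq_decide, ← hlen]
    omega
  · have hlen2 : D.keys.length = (s :: t :: rest).length := hf ▸ hperm.length_eq
    rw [hitems]
    rcases hke : D.keys with _ | ⟨u, _ | ⟨v, r2⟩⟩
    · rw [hke] at hlen2; simp at hlen2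
    · rw [hke] at hlen2; simp at hlen2
    · rfl
  
-- ===== VERDICT (by name: the statement is the Claim_ definition above) =====
theorem performers_match_single_artist_spec : Claim_equal_performers_match_single_artist := by
  intro pn pa _dom hpre
  unfold Spec_performers_match_single_artist
  unfold performers_match_single_artist performers_match_single_artist_alt
  by_cases h1 : (pn.isEmpty || pa.isEmpty) = true
  · rw [if_pos h1, if_pos h1]
  · rw [if_neg h1, if_neg h1]
    by_cases h2 : pa.length ≤ 1
    · rw [if_pos h2, if_pos h2]
    · rw [if_neg h2, if_neg h2]
      refine Eq.trans ?_ (pv_bridge pn pa hpre)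
      simp only [pvMatch_eq]
      have hmain := pv_main (pn.map (fun name => PySem.Str.strip (PySem.Str.lower name))) pa hpre
      simp only [pvMatch_eq] at hmain
      exact hmain
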